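-- pv_equiv track=rewrite | github.com/Kenta-Han/TouristSpot | cgi-bin/mypackage/spot_def.py | Kantou
-- ===== SOURCE A (Python) =====
-- def Kantou(spot):
-- 	now_spot = spot[0][0]
-- 	spot_alone = {}
-- 	spot_all = []
-- 	for word in spot:
-- 		if now_spot != word[0]:
-- 			now_spot = word[0]
-- 			spot_all.append(spot_alone)
-- 			spot_alone = {}
-- 			spot_alone[word[1]] = word[2]
-- 		else:
-- 			spot_alone[word[1]] = word[2]
-- 	spot_all.append(spot_alone)
-- 	return spot_all
-- ===== SOURCE B (Python) =====
-- def Kantou(spot):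
--     n = len(spot)
--     starts = [i for i in range(n) if i == 0 or spot[i][0] != spot[i - 1][0]]
--     ends = starts[1:] + [n]
--     return [{w[1]: w[2] for w in spot[s:e]} for s, e in zip(starts, ends)]
-- ===== Notes on version B (the rewrite author's own statement) =====
-- stated objective: alternative
-- what changed: Replaces A's single sentinel-carrying accumulator loop by staged passes: first compute the boundary indices where the first field changes, then slice the list at those boundaries, then build one dict per slice.
import Mathlib
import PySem

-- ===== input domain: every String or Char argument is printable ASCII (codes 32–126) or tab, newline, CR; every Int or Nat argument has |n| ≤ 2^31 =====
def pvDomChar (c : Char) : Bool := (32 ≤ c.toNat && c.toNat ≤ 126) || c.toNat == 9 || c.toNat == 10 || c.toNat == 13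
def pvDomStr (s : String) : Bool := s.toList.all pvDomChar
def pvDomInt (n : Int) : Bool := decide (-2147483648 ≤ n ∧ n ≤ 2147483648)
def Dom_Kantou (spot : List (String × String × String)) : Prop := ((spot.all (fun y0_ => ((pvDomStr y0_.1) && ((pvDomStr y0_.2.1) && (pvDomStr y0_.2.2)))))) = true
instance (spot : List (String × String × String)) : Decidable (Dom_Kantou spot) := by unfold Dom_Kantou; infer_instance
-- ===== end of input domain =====

-- B replaces A's sentinel-carrying single pass by staged passes: boundary indices, slices, one dict per slice (alternative, same cost).

-- Python dict assignment d[k] = v on a String-keyed dict (overwrite in place, new keys append); exact.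
def dictInsert : List (String × String) → String → String → List (String × String)
  | [], k, v => [(k, v)]
  | (k', v') :: rest, k, v =>
    if k' == k then (k, v) :: rest else (k', v') :: dictInsert rest k v

-- ===== PORT A =====
-- the for-loop of A, state = (now_spot, spot_alone, spot_all)
def Kantou_loop (now : String) (alone : List (String × String))
    (all : List (List (String × String))) :
    List (String × String × String) → List (List (String × String))
  | [] => all ++ [alone]
  | w :: ws =>
    if now ≠ w.1 then
      Kantou_loop w.1 (dictInsert [] w.2.1 w.2.2) (all ++ [alone]) ws
    else
      Kantou_loop now (dictInsert alone w.2.1 w.2.2) all ws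

def Kantou (spot : List (String × String × String)) : List (List (String × String)) :=
  match spot with
  | [] => []   -- Python raises IndexError at spot[0][0]; excluded by Pre_Kantou
  | w :: _ => Kantou_loop w.1 [] [] spot

-- ===== PORT B =====
-- spot[i] for i in range(n) is always in range, so getD with a dummy default is exact here;
-- for i = 0 the `i == 0` disjunct makes the (unreached in Python) i-1 lookup irrelevant.
def pvD0 : String × String × String := ("", "", "")

-- the list comprehension [i for i in range(n) if i == 0 or spot[i][0] != spot[i-1][0]]
def Kantou_starts (spot : List (String × String × String)) : List Nat :=
  (List.range spot.length).filter
    (fun i => i == 0 || (spot.getD i pvD0).1 != (spot.getD (i - 1) pvD0).1)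

-- the dict comprehension {w[1]: w[2] for w in spot[s:e]}
def Kantou_build (run : List (String × String × String)) : List (String × String) :=
  run.foldl (fun d x => dictInsert d x.2.1 x.2.2) []

def Kantou_alt (spot : List (String × String × String)) : List (List (String × String)) :=
  let n := spot.length
  let starts := Kantou_starts spot
  let ends := starts.tail ++ [n]            -- starts[1:] + [n]
  (starts.zip ends).map
    (fun p => Kantou_build (PySem.List.slice spot (some (p.1 : Int)) (some (p.2 : Int))))

-- ===== PRECONDITION & SPEC =====
-- A indexes spot[0][0] and so raises IndexError on the empty list; Pre_ excludes exactly that input.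
def Pre_Kantou (spot : List (String × String × String)) : Prop := spot ≠ []
instance (spot : List (String × String × String)) : Decidable (Pre_Kantou spot) := by
  unfold Pre_Kantou; infer_instance
def pvWitness_Kantou : (List (String × String × String)) := [("a", "b", "c")]

def Spec_Kantou (spot : List (String × String × String)) (out : List (List (String × String))) : Prop := out = Kantou_alt spot
instance (spot : List (String × String × String)) (out : List (List (String × String))) : Decidable (Spec_Kantou spot out) := by unfold Spec_Kantou; infer_instance

-- ===== CLAIM (what is proved, stated in full; the proofs are below) =====
def Claim_equal_Kantou : Prop := ∀ (spot : List (String × String × String)), Dom_Kantou spot → Pre_Kantou spot → Spec_Kantou spot (Kantou spot)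

-- ===== LEMMAS AND PROOFS =====

-- proof-only helper: the maximal consecutive runs of equal first fields
def Kantou_runs : List (String × String × String) → List (List (String × String × String))
  | [] => []
  | w :: ws =>
    (w :: ws.takeWhile (fun x => x.1 == w.1)) ::
      Kantou_runs (ws.dropWhile (fun x => x.1 == w.1))
termination_by l => l.length
decreasing_by
  exact Nat.lt_succ_of_le (List.length_dropWhile_le _ _)

-- the accumulator spot_all only collects finished dicts at the front
theorem Kantou_loop_acc (l : List (String × String × String)) :
    ∀ (now : String) (alone : List (String × String)) (all : List (List (String × String))),
      Kantou_loop now alone all l = all ++ Kantou_loop now alone [] l := by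
  induction l with
  | nil => intro now alone all; simp [Kantou_loop]
  | cons w ws ih =>
    intro now alone all
    simp only [Kantou_loop]
    split_ifs with h
    · rw [ih w.1 (dictInsert [] w.2.1 w.2.2) (all ++ [alone]), ih w.1 (dictInsert [] w.2.1 w.2.2) ([] ++ [alone])]; simp
    · rw [ih, ih now (dictInsert alone w.2.1 w.2.2) []]

-- characterisation of A's loop with empty accumulator in terms of runs
theorem Kantou_loop_runs (l : List (String × String × String)) :
    ∀ (now : String) (d : List (String × String)),
      Kantou_loop now d [] l =
        ((l.takeWhile (fun x => x.1 == now)).foldl (fun d x => dictInsert d x.2.1 x.2.2) d)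
          :: (Kantou_runs (l.dropWhile (fun x => x.1 == now))).map Kantou_build := by
  induction l with
  | nil => intro now d; simp [Kantou_loop, Kantou_runs]
  | cons w ws ih =>
    intro now d
    simp only [Kantou_loop]
    by_cases h : now = w.1
    · subst h
      rw [if_neg (by simp)]
      rw [ih]
      simp [List.takeWhile, List.dropWhile]
    · rw [if_pos (by exact h)]
      rw [Kantou_loop_acc, ih]
      have hb : (w.1 == now) = false := beq_eq_false_iff_ne.mpr (fun hc => h hc.symm)
      have ht : (w :: ws).takeWhile (fun x => x.1 == now) = [] := by
        simp [List.takeWhile, hb]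
      have hd : (w :: ws).dropWhile (fun x => x.1 == now) = w :: ws := by
        simp [List.dropWhile, hb]
      rw [ht, hd]
      simp only [List.foldl]
      rw [Kantou_runs]
      simp [Kantou_build]

-- B-side: the boundary-index list of w :: ws is 0 followed by the (shifted) boundaries of the remainder after the first run
theorem Kantou_starts_cons (w : String × String × String) (ws : List (String × String × String)) :
    Kantou_starts (w :: ws) =
      0 :: (Kantou_starts (ws.dropWhile (fun x => x.1 == w.1))).map
            (fun j => ((ws.takeWhile (fun x => x.1 == w.1)).length + 1) + j) := by
  set p : (String × String × String) → Bool := fun x => x.1 == w.1 with hp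
  set t := ws.takeWhile p with htdef
  set d := ws.dropWhile p with hddef
  set r := t.length + 1 with hr
  have hws : w :: ws = (w :: t) ++ d := by
    simp [htdef, hddef, List.takeWhile_append_dropWhile]
  have hkey : ∀ j, j ≤ t.length → ((w :: ws).getD j pvD0).1 = w.1 := by
    intro j hj
    match j with
    | 0 => rfl
    | Nat.succ k =>
      have hk : k < t.length := by omega
      have h1 : (w :: ws).getD (k + 1) pvD0 = ws.getD k pvD0 := rfl
      have h2 : ws.getD k pvD0 = t.getD k pvD0 := by
        conv_lhs => rw [← List.takeWhile_append_dropWhile (p := p) (l := ws)]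
        exact List.getD_append _ _ _ _ hk
      have h3 : t.getD k pvD0 = t[k] := List.getD_eq_getElem t pvD0 hk
      have h4 : p t[k] := List.mem_takeWhile_imp (List.getElem_mem hk)
      rw [h1, h2, h3]
      exact eq_of_beq h4
  have hlen : (w :: ws).length = r + d.length := by
    rw [hws]; simp [hr]; omega
  have hgetd : ∀ k, ((w :: ws).getD (r + k) pvD0) = d.getD k pvD0 := by
    intro k
    rw [hws]
    have hle : (w :: t).length ≤ r + k := by simp [hr]
    rw [List.getD_append_right _ _ _ _ hle]
    congr 1
    simp [hr]
  simp only [Kantou_starts]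
  rw [hlen, List.range_add, List.filter_append]
  have hA : List.filter (fun i => i == 0 || ((w :: ws).getD i pvD0).1 != ((w :: ws).getD (i - 1) pvD0).1) (List.range r) = [0] := by
    rw [hr, List.range_succ_eq_map, List.filter_cons]
    simp only [beq_self_eq_true, Bool.true_or, if_pos]
    rw [List.filter_map]
    have hnil : List.filter ((fun i => i == 0 || ((w :: ws).getD i pvD0).1 != ((w :: ws).getD (i - 1) pvD0).1) ∘ Nat.succ) (List.range t.length) = [] := by
      rw [List.filter_eq_nil_iff]
      intro i hi
      have hi' : i < t.length := List.mem_range.mp hi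
      have e1 : ((w :: ws).getD (i + 1) pvD0).1 = w.1 := hkey (i + 1) (by omega)
      have e2 : ((w :: ws).getD (i + 1 - 1) pvD0).1 = w.1 := hkey i (by omega)
      show ¬ ((i + 1 == 0) || (((w :: ws).getD (i + 1) pvD0).1 != ((w :: ws).getD (i + 1 - 1) pvD0).1)) = true
      rw [e1, e2]
      simp
    rw [hnil]
    simp
  have hB : List.filter (fun i => i == 0 || ((w :: ws).getD i pvD0).1 != ((w :: ws).getD (i - 1) pvD0).1) (List.map (fun x => r + x) (List.range d.length)) = List.map (fun x => r + x) (Kantou_starts d) := by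
    rw [List.filter_map]
    by_cases hdn : d = []
    · rw [hdn]; simp [Kantou_starts]
    · obtain ⟨y, d', hd⟩ := List.exists_cons_of_ne_nil hdn
      have hy : p y = false := by
        have := List.head?_dropWhile_not p ws
        rw [← hddef, hd] at this; simpa using this
      have hq : ∀ j ∈ List.range d.length,
          ((fun i => i == 0 || ((w :: ws).getD i pvD0).1 != ((w :: ws).getD (i - 1) pvD0).1) ∘ (fun x => r + x)) j
            = (fun i => i == 0 || (d.getD i pvD0).1 != (d.getD (i - 1) pvD0).1) j := by
        intro j hj
        match j with
        | 0 =>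
          have e1 : (w :: ws).getD (r + 0) pvD0 = d.getD 0 pvD0 := hgetd 0
          have e2 : ((w :: ws).getD (r + 0 - 1) pvD0).1 = w.1 := by
            have h0 : r + 0 - 1 = t.length := by omega
            rw [h0]; exact hkey t.length le_rfl
          have e3 : (d.getD 0 pvD0).1 = y.1 := by rw [hd]; rfl
          show ((r + 0 == 0) || ((w :: ws).getD (r + 0) pvD0).1 != ((w :: ws).getD (r + 0 - 1) pvD0).1)
              = ((0 == 0) || (d.getD 0 pvD0).1 != (d.getD (0 - 1) pvD0).1)
          have hr0 : (r + 0 == 0) = false := by simp [hr]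
          rw [hr0, e1, e2, e3]
          have hne : (y.1 != w.1) = true := by simp [bne]; exact fun hc => by simp [hp, hc] at hy
          simp [hne]
        | Nat.succ k =>
          have e1 : (w :: ws).getD (r + (k + 1)) pvD0 = d.getD (k + 1) pvD0 := hgetd (k + 1)
          have e2 : (w :: ws).getD (r + (k + 1) - 1) pvD0 = d.getD k pvD0 := by
            have h0 : r + (k + 1) - 1 = r + k := by omega
            rw [h0]; exact hgetd k
          show ((r + (k + 1) == 0) || ((w :: ws).getD (r + (k + 1)) pvD0).1 != ((w :: ws).getD (r + (k + 1) - 1) pvD0).1)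
              = ((k + 1 == 0) || (d.getD (k + 1) pvD0).1 != (d.getD (k + 1 - 1) pvD0).1)
          have hr0 : (r + (k + 1) == 0) = false := by simp [hr]
          have hk0 : (k + 1 == 0) = false := by simp
          rw [hr0, hk0, e1, e2]
          rfl
      rw [List.filter_congr hq]
      rfl
  rw [hA, hB]
  rfl

-- B-side: the staged construction equals the runs construction
theorem Kantou_alt_eq_runs (spot : List (String × String × String)) :
    Kantou_alt spot = (Kantou_runs spot).map Kantou_build := by
  induction spot using Kantou_runs.induct with
  | case1 => simp [Kantou_alt, Kantou_runs, Kantou_starts]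
  | case2 w ws ih =>
    set p : (String × String × String) → Bool := fun x => x.1 == w.1 with hp
    set t := ws.takeWhile p with htdef
    set d := ws.dropWhile p with hddef
    set r := t.length + 1 with hr
    have hws : w :: ws = (w :: t) ++ d := by
      simp [htdef, hddef, List.takeWhile_append_dropWhile]
    have hlen : (w :: ws).length = r + d.length := by rw [hws]; simp [hr]; omega
    have hslice : ∀ a b : Nat,
        PySem.List.slice (w :: ws) (some ((r + a : Nat) : Int)) (some ((r + b : Nat) : Int))
          = PySem.List.slice d (some (a : Int)) (some (b : Int)) := by
      intro a b
      rw [PySem.List.slice_natCast, PySem.List.slice_natCast]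
      have h1 : List.drop (r + a) (w :: ws) = List.drop a d := by
        rw [hws, List.drop_append]
        have h2 : (w :: t).length = r := by simp [hr]
        have h3 : List.drop (r + a) (w :: t) = [] := by
          apply List.drop_eq_nil_of_le; omega
        rw [h3, h2]
        simp
      have h2 : r + b - (r + a) = b - a := by omega
      rw [h1, h2]
    have hfirst : PySem.List.slice (w :: ws) (some ((0 : Nat) : Int)) (some ((r : Nat) : Int)) = w :: t := by
      rw [PySem.List.slice_natCast]
      simp only [List.drop_zero, Nat.sub_zero]
      rw [hws]
      have h2 : (w :: t).length = r := by simp [hr]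
      rw [← h2]; exact List.take_left
    rw [Kantou_runs]
    simp only [List.map_cons]
    simp only [Kantou_alt]
    rw [Kantou_starts_cons, ← hp, ← htdef, ← hddef, ← hr, hlen]
    by_cases hdn : d = []
    · have hs0 : Kantou_starts d = [] := by rw [hdn]; rfl
      have hl0 : d.length = 0 := by rw [hdn]; rfl
      have hruns : Kantou_runs d = [] := by rw [hdn, Kantou_runs]
      rw [hs0, hl0, hruns]
      simp only [List.map_nil, List.tail_cons, List.nil_append, Nat.add_zero,
        List.zip_cons_cons, List.zip_nil_right, List.map_cons, List.map_nil]
      rw [hfirst]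
    · obtain ⟨y, d', hdc⟩ := List.exists_cons_of_ne_nil hdn
      obtain ⟨R, hR⟩ : ∃ R, Kantou_starts d = 0 :: R :=
        ⟨_, by rw [hdc]; exact Kantou_starts_cons y d'⟩
      rw [hR]
      simp only [List.map_cons, Nat.add_zero, List.tail_cons, List.cons_append]
      rw [List.zip_cons_cons, List.map_cons, ← ih]
      congr 1
      · exact congrArg Kantou_build hfirst
      · simp only [Kantou_alt]
        rw [hR]
        simp only [List.tail_cons]
        have hm1 : (r :: List.map (fun j => r + j) R) = List.map (fun j => r + j) (0 :: R) := by
          simp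
        have hm2 : (List.map (fun j => r + j) R ++ [r + d.length])
            = List.map (fun j => r + j) (R ++ [d.length]) := by
          simp
        rw [hm1, hm2, List.zip_map, List.map_map]
        apply List.map_congr_left
        intro q _
        simp only [Function.comp, Prod.map]
        exact congrArg Kantou_build (hslice q.1 q.2)

-- ===== VERDICT (by name: the statement is the Claim_ definition above) =====
theorem Kantou_spec : Claim_equal_Kantou := by
  intro spot _ hpre
  unfold Spec_Kantou
  rw [Kantou_alt_eq_runs]
  match spot with
  | [] => exact absurd rfl hpre
  | w :: ws =>
    show Kantou_loop w.1 [] [] (w :: ws) = _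
    rw [Kantou_loop_runs]
    have h1 : ((w :: ws).takeWhile (fun x => x.1 == w.1)) = w :: ws.takeWhile (fun x => x.1 == w.1) := by
      simp [List.takeWhile]
    have h2 : ((w :: ws).dropWhile (fun x => x.1 == w.1)) = ws.dropWhile (fun x => x.1 == w.1) := by
      simp [List.dropWhile]
    rw [h1, h2, Kantou_runs]
    simp [Kantou_build]
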